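-- pv_equiv track=rewrite | github.com/GizawAAiT/Codeforces | B_Count_Subrectangles.py | count_subrectangles_fast
-- ===== SOURCE A (Python) =====
-- import math, sys
--
-- def count_len(runs, L):
--     """number of sub-segments of length L inside the list of run lengths"""
--     return sum(r - L + 1 for r in runs if r >= L)
--
-- def count_subrectangles_fast(a, b, k):
--     n, m = len(a), len(b)
--
--     # gather run lengths
--     runsA, runsB = [], []
--     cur = 0
--     for v in a:
--         if v: cur += 1
--         else:
--             if cur: runsA.append(cur)
--             cur = 0
--     if cur: runsA.append(cur)
--
--     cur = 0
--     for v in b: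
--         if v: cur += 1
--         else:
--             if cur: runsB.append(cur)
--             cur = 0
--     if cur: runsB.append(cur)
--
--     ans = 0
--     for x in range(1, int(math.isqrt(k)) + 1):
--         if k % x == 0:
--             y = k // x
--             ans += count_len(runsA, x) * count_len(runsB, y)
--             if x != y:                       # complementary dimensions
--                 ans += count_len(runsA, y) * count_len(runsB, x)
--     return ans
-- ===== SOURCE B (Python) =====
-- import math
--
-- def count_subrectangles_fast(a, b, k):
--     def cnt_table(xs):
--         # freq[e] = number of positions whose run of truthy values ending there has length e
--         freq = {}
--         e = 0
--         for v in xs: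
--             e = e + 1 if v else 0
--             if e:
--                 freq[e] = freq.get(e, 0) + 1
--         # cnt[L] = number of positions with ending-run length >= L
--         #        = number of all-truthy subsegments of length L  (suffix sums of freq)
--         cnt = {}
--         ge = 0
--         for L in range(len(xs), 0, -1):
--             ge += freq.get(L, 0)
--             cnt[L] = ge
--         return cnt
--
--     cA, cB = cnt_table(a), cnt_table(b)
--     return sum(cA.get(x, 0) * cB.get(k // x, 0)
--                + (cA.get(k // x, 0) * cB.get(x, 0) if x * x != k else 0)
--                for x in range(1, math.isqrt(k) + 1) if k % x == 0)
-- ===== Notes on version B (the rewrite author's own statement) =====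
-- stated objective: alternative
-- what changed: Instead of materialising the run-length lists and rescanning them with count_len for every divisor of k, B counts ending-run lengths once into a frequency table, turns it into a lookup table cnt[L] by suffix summation, and the divisor loop does dictionary lookups instead of list scans.
import Mathlib
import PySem

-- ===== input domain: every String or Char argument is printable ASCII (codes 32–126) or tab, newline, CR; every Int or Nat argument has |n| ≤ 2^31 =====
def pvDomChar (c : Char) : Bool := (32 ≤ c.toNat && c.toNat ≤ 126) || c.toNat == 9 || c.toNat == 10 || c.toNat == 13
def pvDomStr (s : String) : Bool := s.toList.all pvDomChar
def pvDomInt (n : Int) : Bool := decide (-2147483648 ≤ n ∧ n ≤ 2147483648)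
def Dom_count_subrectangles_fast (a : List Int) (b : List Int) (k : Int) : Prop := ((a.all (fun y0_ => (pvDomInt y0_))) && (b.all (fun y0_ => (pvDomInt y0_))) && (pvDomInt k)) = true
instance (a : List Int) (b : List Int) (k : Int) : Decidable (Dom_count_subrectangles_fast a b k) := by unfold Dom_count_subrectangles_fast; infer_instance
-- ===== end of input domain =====

-- B replaces A's per-divisor rescans of the run lists (count_len) by a lookup table built once
-- (suffix sums of ending-run-length frequencies); a different algorithm with the same return value.

-- ===== PORT A =====
-- helper count_len: sum(r - L + 1 for r in runs if r >= L)
def pvCountLen (runs : List Int) (L : Int) : Int :=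
  ((runs.filter (fun r => L ≤ r)).map (fun r => r - L + 1)).sum

def pvGatherStep (s : List Int × Int) (v : Int) : List Int × Int :=
  if v ≠ 0 then (s.1, s.2 + 1)
  else if s.2 ≠ 0 then (s.1 ++ [s.2], 0)
  else (s.1, 0)

def pvFinalize (s : List Int × Int) : List Int :=
  if s.2 ≠ 0 then s.1 ++ [s.2] else s.1

def pvGather (xs : List Int) : List Int :=
  pvFinalize (xs.foldl pvGatherStep ([], 0))

def count_subrectangles_fast (a : List Int) (b : List Int) (k : Int) : Int :=
  let runsA := pvGather a
  let runsB := pvGather b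
  (PySem.List.pyRange 1 ((Nat.sqrt k.toNat : Int) + 1) 1).foldl
    (fun ans x =>
      if PySem.Int.mod k x = 0 then
        let y := PySem.Int.floordiv k x
        let ans1 := ans + pvCountLen runsA x * pvCountLen runsB y
        if x ≠ y then ans1 + pvCountLen runsA y * pvCountLen runsB x else ans1
      else ans) 0

-- ===== PORT B =====
def pvFreqStep (s : PySem.Dict Int Int × Int) (v : Int) : PySem.Dict Int Int × Int :=
  let e := if v ≠ 0 then s.2 + 1 else 0
  if e ≠ 0 then (s.1.insert e (s.1.getD e 0 + 1), e) else (s.1, e)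

def pvCntStep (freq : PySem.Dict Int Int) (s : PySem.Dict Int Int × Int) (L : Int) :
    PySem.Dict Int Int × Int :=
  let ge := s.2 + freq.getD L 0
  (s.1.insert L ge, ge)

def pvCntTable (xs : List Int) : PySem.Dict Int Int :=
  let freq := (xs.foldl pvFreqStep (PySem.Dict.empty, 0)).1
  ((PySem.List.pyRange (xs.length : Int) 0 (-1)).foldl (pvCntStep freq)
    (PySem.Dict.empty, 0)).1

def count_subrectangles_fast_alt (a : List Int) (b : List Int) (k : Int) : Int :=
  let cA := pvCntTable a
  let cB := pvCntTable b
  (((PySem.List.pyRange 1 ((Nat.sqrt k.toNat : Int) + 1) 1).filter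
      (fun x => PySem.Int.mod k x == 0)).map
    (fun x =>
      cA.getD x 0 * cB.getD (PySem.Int.floordiv k x) 0 +
        (if x * x ≠ k then cA.getD (PySem.Int.floordiv k x) 0 * cB.getD x 0 else 0))).sum

-- ===== PRECONDITION & SPEC =====
-- Pre_ excludes k < 0, on which A raises ValueError (math.isqrt of a negative argument).
def Pre_count_subrectangles_fast (a : List Int) (b : List Int) (k : Int) : Prop := 0 ≤ k
instance (a : List Int) (b : List Int) (k : Int) : Decidable (Pre_count_subrectangles_fast a b k) := by unfold Pre_count_subrectangles_fast; infer_instance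

def pvWitness_count_subrectangles_fast : List Int × List Int × Int := ([1, 1, 0, 1], [1, 1], 2)

def Spec_count_subrectangles_fast (a : List Int) (b : List Int) (k : Int) (out : Int) : Prop := out = count_subrectangles_fast_alt a b k
instance (a : List Int) (b : List Int) (k : Int) (out : Int) : Decidable (Spec_count_subrectangles_fast a b k out) := by unfold Spec_count_subrectangles_fast; infer_instance

-- ===== CLAIM (what is proved, stated in full; the proofs are below) =====
def Claim_equal_count_subrectangles_fast : Prop := ∀ (a : List Int) (b : List Int) (k : Int), Dom_count_subrectangles_fast a b k → Pre_count_subrectangles_fast a b k → Spec_count_subrectangles_fast a b k (count_subrectangles_fast a b k)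

-- ===== LEMMAS AND PROOFS =====
-- the per-position ending-run lengths of xs (kept when positive): the hub relating
-- A's run list to B's frequency/suffix-sum dictionaries
def pvEs : List Int → Int → List Int
  | [], _ => []
  | v :: t, e =>
    let e' := if v ≠ 0 then e + 1 else 0
    (if e' ≠ 0 then [e'] else []) ++ pvEs t e'

theorem pvRangeDescFormula (n : Nat) :
    PySem.List.pyRange (n : Int) 0 (-1) = (List.range n).map (fun j : Nat => (n : Int) + (-1) * j) := by
  unfold PySem.List.pyRange
  rcases Nat.eq_zero_or_pos n with h | h
  · subst h; simp
  · have h0 : (0:Int) < (n:Int) := by exact_mod_cast h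
    simp only [if_neg (by norm_num : ¬ (-1:Int) = 0), if_neg (by omega : ¬ (0:Int) < -1),
      if_pos h0]
    have : (((n:Int) - 0 + -(-1) - 1) / -(-1)).toNat = n := by norm_num
    rw [this]

theorem pvRangeDescCons (n : Nat) :
    PySem.List.pyRange ((n : Int) + 1) 0 (-1) = ((n : Int) + 1) :: PySem.List.pyRange (n : Int) 0 (-1) := by
  have h1 := pvRangeDescFormula (n+1)
  push_cast at h1
  rw [h1, pvRangeDescFormula n, List.range_succ_eq_map]
  simp only [List.map_cons, List.map_map]
  refine List.cons_eq_cons.mpr ⟨by push_cast; ring, ?_⟩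
  apply List.map_congr_left
  intro j hj
  simp only [Function.comp_apply, Nat.succ_eq_add_one]
  push_cast
  ring

theorem pvFreqCounts (xs : List Int) (d : PySem.Dict Int Int) (e v0 : Int) (he : 0 ≤ e) :
    ((xs.foldl pvFreqStep (d, e)).1).getD v0 0 = d.getD v0 0 + ((pvEs xs e).count v0 : Int) := by
  induction xs generalizing d e with
  | nil => simp [pvEs]
  | cons v t ih =>
    by_cases hv : v = 0
    · subst hv
      simp only [List.foldl_cons, pvFreqStep, pvEs]
      simp [ih d 0 le_rfl]
    · have hne : e + 1 ≠ 0 := by omega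
      have hstep : pvFreqStep (d, e) v = (d.insert (e+1) (d.getD (e+1) 0 + 1), e+1) := by
        simp [pvFreqStep, hv, hne]
      have hes : pvEs (v :: t) e = (e+1) :: pvEs t (e+1) := by
        simp [pvEs, hv, hne]
      rw [List.foldl_cons, hstep, ih _ (e+1) (by omega), hes]
      rw [PySem.Dict.getD_insert]
      rw [List.count_cons]
      by_cases h1 : v0 = e + 1
      · subst h1
        simp
        ring
      · have h2 : ((e + 1) == v0) = false := by
          simp [Ne.symm h1]
        simp [h1, h2]

def pvSuffSum (d : PySem.Dict Int Int) (L n : Int) : Int :=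
  ((PySem.List.pyRange L (n + 1) 1).map (fun M => d.getD M 0)).sum

theorem pvCntLoop (freq : PySem.Dict Int Int) (n : Nat) (cnt : PySem.Dict Int Int) (ge L : Int) :
    (((PySem.List.pyRange (n : Int) 0 (-1)).foldl (pvCntStep freq) (cnt, ge)).1).getD L 0 =
      if 1 ≤ L ∧ L ≤ (n : Int) then ge + pvSuffSum freq L n else cnt.getD L 0 := by
  induction n generalizing cnt ge with
  | zero =>
    have h0 : PySem.List.pyRange ((0:Nat) : Int) 0 (-1) = [] := by
      rw [pvRangeDescFormula 0]; simp
    rw [h0]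
    simp only [List.foldl_nil]
    rw [if_neg (by omega)]
  | succ m ih =>
    rw [(by push_cast; ring : ((m+1 : Nat):Int) = ((m:Nat):Int) + 1), pvRangeDescCons m]
    rw [List.foldl_cons]
    have hstep : pvCntStep freq (cnt, ge) ((m:Int)+1) =
        (cnt.insert ((m:Int)+1) (ge + freq.getD ((m:Int)+1) 0), ge + freq.getD ((m:Int)+1) 0) := rfl
    rw [hstep, ih]
    by_cases hL1 : 1 ≤ L ∧ L ≤ (m:Int)
    · have hsucc : pvSuffSum freq L ((m:Int)+1) = pvSuffSum freq L (m:Int) + freq.getD ((m:Int)+1) 0 := by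
        unfold pvSuffSum
        rw [PySem.List.pyRange_one_succ_right (by omega : L ≤ (m:Int)+1)]
        simp
      rw [if_pos hL1, if_pos (by omega), hsucc]; ring
    · rw [if_neg hL1]
      by_cases hL2 : L = (m:Int)+1
      · subst hL2
        rw [if_pos (by constructor <;> omega), PySem.Dict.getD_insert, if_pos rfl]
        have : pvSuffSum freq ((m:Int)+1) ((m:Int)+1) = freq.getD ((m:Int)+1) 0 := by
          unfold pvSuffSum
          rw [PySem.List.pyRange_one_succ_right (by omega : (m:Int)+1 ≤ (m:Int)+1)]
          have : PySem.List.pyRange ((m:Int)+1) ((m:Int)+1) = [] := by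
            rw [PySem.List.pyRange_one]; simp
          rw [this]
          simp
        rw [this]
      · rw [if_neg (by omega), PySem.Dict.getD_insert, if_neg hL2]

theorem pvCountNodup (r : List Int) (x : Int) (h : r.Nodup) :
    (r.count x : Int) = if x ∈ r then 1 else 0 := by
  by_cases hm : x ∈ r
  · rw [if_pos hm]
    have h1 : r.count x ≤ 1 := List.nodup_iff_count_le_one.mp h x
    have h2 : 0 < r.count x := List.count_pos_iff.mpr hm
    omega
  · rw [if_neg hm]
    simp [List.count_eq_zero_of_not_mem hm]

theorem pvSumCounts (es : List Int) (L n : Int)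
    (hb : ∀ v ∈ es, v ≤ n) :
    ((PySem.List.pyRange L (n + 1) 1).map (fun M => (es.count M : Int))).sum =
      (es.countP (fun v => decide (L ≤ v)) : Int) := by
  induction es with
  | nil => simp
  | cons x t ih =>
    have hb' : ∀ v ∈ t, v ≤ n := fun v hv => hb v (List.mem_cons_of_mem _ hv)
    have hsplit : ∀ M : Int, ((x :: t).count M : Int) = (t.count M : Int) + (if x = M then 1 else 0) := by
      intro M
      rw [List.count_cons]
      by_cases hxM : x = M
      · simp [hxM]
      · have : ¬ (x == M) = true := by simpa using hxM
        simp [this, hxM]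
    calc ((PySem.List.pyRange L (n + 1) 1).map (fun M => ((x :: t).count M : Int))).sum
        = ((PySem.List.pyRange L (n + 1) 1).map (fun M => (t.count M : Int) + (if x = M then 1 else 0))).sum := by
          exact congrArg List.sum (List.map_congr_left (fun M _ => hsplit M))
      _ = ((PySem.List.pyRange L (n + 1) 1).map (fun M => (t.count M : Int))).sum
            + ((PySem.List.pyRange L (n + 1) 1).map (fun M => (if x = M then 1 else 0 : Int))).sum := by
          exact List.sum_map_add
      _ = (t.countP (fun v => decide (L ≤ v)) : Int) + (if L ≤ x then 1 else 0) := by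
          rw [ih hb']
          congr 1
          have hnd : (PySem.List.pyRange L (n + 1) 1).Nodup := PySem.List.nodup_pyRange_one L (n+1)
          have e1 : ((PySem.List.pyRange L (n + 1) 1).map (fun M => (if x = M then 1 else 0 : Int))).sum
              = (((PySem.List.pyRange L (n + 1) 1).countP (fun M => x == M)) : Int) := by
            rw [← PySem.List.sum_map_ite_one_zero (fun M => x == M) (PySem.List.pyRange L (n + 1) 1)]
            exact congrArg List.sum (List.map_congr_left (fun M _ => by by_cases h : x = M <;> simp [h]))
          have e2 : (PySem.List.pyRange L (n + 1) 1).countP (fun M => x == M)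
              = (PySem.List.pyRange L (n + 1) 1).count x := by
            rw [List.count_eq_countP]
            exact List.countP_congr (fun M _ => by simp only [beq_iff_eq]; exact eq_comm)
          rw [e1, e2, pvCountNodup _ _ hnd]
          have hx : x ≤ n := hb x List.mem_cons_self
          by_cases hLx : L ≤ x
          · rw [if_pos (PySem.List.mem_pyRange_one.mpr ⟨hLx, by omega⟩), if_pos hLx]
          · rw [if_neg (fun hm => hLx (PySem.List.mem_pyRange_one.mp hm).1), if_neg hLx]
      _ = ((x :: t).countP (fun v => decide (L ≤ v)) : Int) := by
          rw [List.countP_cons]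
          by_cases hx : L ≤ x <;> simp [hx]

theorem pvCountLenAppend (rs : List Int) (c L : Int) :
    pvCountLen (rs ++ [c]) L = pvCountLen rs L + (if L ≤ c then c - L + 1 else 0) := by
  unfold pvCountLen
  rw [List.filter_append]
  by_cases h : L ≤ c <;> simp [h]

theorem pvEsBounds (xs : List Int) (e : Int) (he : 0 ≤ e) :
    ∀ v ∈ pvEs xs e, 1 ≤ v ∧ v ≤ e + xs.length := by
  induction xs generalizing e with
  | nil => simp [pvEs]
  | cons x t ih =>
    intro v hv
    by_cases hx : x = 0
    · have : pvEs (x :: t) e = pvEs t 0 := by simp [pvEs, hx]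
      rw [this] at hv
      have := ih 0 le_rfl v hv
      simp at this ⊢
      omega
    · have hne : e + 1 ≠ 0 := by omega
      have : pvEs (x :: t) e = (e+1) :: pvEs t (e+1) := by simp [pvEs, hx, hne]
      rw [this] at hv
      rcases List.mem_cons.mp hv with h | h
      · subst h; simp; omega
      · have := ih (e+1) (by omega) v h
        simp at this ⊢
        omega

theorem pvGatherCount (xs : List Int) (runs : List Int) (cur L : Int)
    (hc : 0 ≤ cur) (hL : 1 ≤ L) :
    pvCountLen (pvFinalize (xs.foldl pvGatherStep (runs, cur))) L =
      pvCountLen (pvFinalize (runs, cur)) L +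
        ((pvEs xs cur).countP (fun v => decide (L ≤ v)) : Int) := by
  induction xs generalizing runs cur with
  | nil => simp [pvEs]
  | cons x t ih =>
    by_cases hx : x = 0
    · subst hx
      have hstep : pvGatherStep (runs, cur) 0 = (pvFinalize (runs, cur), 0) := by
        unfold pvGatherStep pvFinalize
        by_cases h : cur = 0 <;> simp [h]
      have hes : pvEs (0 :: t) cur = pvEs t 0 := by simp [pvEs]
      rw [List.foldl_cons, hstep, hes, ih _ 0 le_rfl]
      have : pvFinalize (pvFinalize (runs, cur), 0) = pvFinalize (runs, cur) := by
        simp [pvFinalize]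
      rw [this]
    · have hne : cur + 1 ≠ 0 := by omega
      have hstep : pvGatherStep (runs, cur) x = (runs, cur + 1) := by
        simp [pvGatherStep, hx]
      have hes : pvEs (x :: t) cur = (cur+1) :: pvEs t (cur+1) := by
        simp [pvEs, hx, hne]
      rw [List.foldl_cons, hstep, hes, ih _ (cur+1) (by omega)]
      rw [List.countP_cons]
      have key : pvCountLen (pvFinalize (runs, cur+1)) L =
          pvCountLen (pvFinalize (runs, cur)) L + (if L ≤ cur + 1 then 1 else 0) := by
        have f1 : pvFinalize (runs, cur+1) = runs ++ [cur+1] := by simp [pvFinalize, hne]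
        rw [f1, pvCountLenAppend]
        by_cases h : cur = 0
        · have f2 : pvFinalize (runs, cur) = runs := by simp [pvFinalize, h]
          rw [f2]; subst h; split_ifs <;> omega
        · have f2 : pvFinalize (runs, cur) = runs ++ [cur] := by simp [pvFinalize, h]
          rw [f2, pvCountLenAppend]; split_ifs <;> omega
      rw [key]
      by_cases hcx : L ≤ cur + 1
      · simp only [hcx, decide_true, if_pos]
        push_cast
        ring
      · simp only [hcx, decide_false]
        push_cast
        ring

theorem pvGatherEqCountP (xs : List Int) (L : Int) (hL : 1 ≤ L) :
    pvCountLen (pvGather xs) L = ((pvEs xs 0).countP (fun v => decide (L ≤ v)) : Int) := by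
  have := pvGatherCount xs [] 0 L le_rfl hL
  unfold pvGather
  simpa [pvFinalize, pvCountLen] using this

theorem pvTableEq (xs : List Int) (L : Int) (hL : 1 ≤ L) :
    (pvCntTable xs).getD L 0 = pvCountLen (pvGather xs) L := by
  unfold pvCntTable
  rw [pvCntLoop]
  rw [pvGatherEqCountP xs L hL]
  have hbound := pvEsBounds xs 0 le_rfl
  by_cases hLn : L ≤ (xs.length : Int)
  · rw [if_pos ⟨hL, hLn⟩]
    unfold pvSuffSum
    have hmap : (PySem.List.pyRange L ((xs.length : Int) + 1) 1).map
          (fun M => ((xs.foldl pvFreqStep (PySem.Dict.empty, 0)).1).getD M 0)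
        = (PySem.List.pyRange L ((xs.length : Int) + 1) 1).map
          (fun M => ((pvEs xs 0).count M : Int)) := by
      apply List.map_congr_left
      intro M _
      rw [pvFreqCounts xs PySem.Dict.empty 0 M le_rfl]
      simp
    rw [hmap, pvSumCounts (pvEs xs 0) L (xs.length : Int)
        (fun v hv => by have := hbound v hv; omega)]
    ring
  · rw [if_neg (by omega)]
    rw [PySem.Dict.getD_empty]
    have : (pvEs xs 0).countP (fun v => decide (L ≤ v)) = 0 := by
      rw [List.countP_eq_zero]
      intro v hv
      have := hbound v hv
      simp only [decide_eq_true_eq]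
      omega
    rw [this]
    simp

theorem pvFoldlIfSum (l : List Int) (p : Int → Bool) (g : Int → Int) (s : Int) :
    l.foldl (fun ans x => if p x then ans + g x else ans) s = s + ((l.filter p).map g).sum := by
  induction l generalizing s with
  | nil => simp
  | cons x t ih =>
    by_cases h : p x
    · simp [h, ih, add_assoc]
    · simp [h, ih]

theorem pvMain (a b : List Int) (k : Int) (hpre : 0 ≤ k) :
    count_subrectangles_fast a b k = count_subrectangles_fast_alt a b k := by
  unfold count_subrectangles_fast count_subrectangles_fast_alt
  simp only []
  set sq : Int := (Nat.sqrt k.toNat : Int) with hsq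
  set r := PySem.List.pyRange 1 (sq + 1) 1 with hr
  set p : Int → Bool := fun x => PySem.Int.mod k x == 0 with hp
  set gA : Int → Int := fun x =>
    pvCountLen (pvGather a) x * pvCountLen (pvGather b) (PySem.Int.floordiv k x) +
      (if x ≠ PySem.Int.floordiv k x then
        pvCountLen (pvGather a) (PySem.Int.floordiv k x) * pvCountLen (pvGather b) x else 0) with hgA
  have step1 : r.foldl
      (fun ans x =>
        if PySem.Int.mod k x = 0 then
          let y := PySem.Int.floordiv k x
          let ans1 := ans + pvCountLen (pvGather a) x * pvCountLen (pvGather b) y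
          if x ≠ y then ans1 + pvCountLen (pvGather a) y * pvCountLen (pvGather b) x else ans1
        else ans) 0
      = r.foldl (fun ans x => if p x then ans + gA x else ans) 0 := by
    apply PySem.List.foldl_congr_mem
    intro acc x _
    by_cases hm : PySem.Int.mod k x = 0
    · have hpx : p x = true := by simp [hp, hm]
      rw [if_pos hm]
      simp only [hpx, if_true, hgA]
      by_cases hxy : x ≠ PySem.Int.floordiv k x
      · rw [if_pos hxy, if_pos hxy]; ring
      · rw [if_neg hxy, if_neg hxy]; ring
    · have hpx : p x = false := by simp [hp, hm]
      rw [if_neg hm]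
      simp [hpx]
  rw [step1, pvFoldlIfSum, zero_add]
  apply congrArg List.sum
  apply List.map_congr_left
  intro x hx
  have hxr : x ∈ r := (List.mem_filter.mp hx).1
  have hpx : p x := (List.mem_filter.mp hx).2
  have hx1 : 1 ≤ x := (PySem.List.mem_pyRange_one.mp hxr).1
  have hxsq : x ≤ sq := by have := (PySem.List.mem_pyRange_one.mp hxr).2; omega
  have hsqk : sq ≤ k := by
    rw [hsq]
    have h1 : Nat.sqrt k.toNat ≤ k.toNat := Nat.sqrt_le_self k.toNat
    omega
  have hxk : x ≤ k := le_trans hxsq hsqk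
  have hxpos : (0:Int) < x := by omega
  have hdvd : x ∣ k := PySem.Int.mod_eq_zero_iff_dvd k x |>.mp (by simpa [hp] using hpx)
  have hy1 : 1 ≤ PySem.Int.floordiv k x := by
    rw [PySem.Int.le_floordiv_iff_mul_le hxpos]; omega
  have hiff : (x ≠ PySem.Int.floordiv k x) ↔ (x * x ≠ k) := by
    rw [PySem.Int.floordiv_eq_ediv_of_pos hxpos]
    constructor
    · intro h hk
      apply h
      rw [← hk, Int.mul_ediv_cancel_left _ (by omega : x ≠ 0)]
    · intro h hk
      apply h
      calc x * x = x * (k / x) := by rw [← hk]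
        _ = k := Int.mul_ediv_cancel' hdvd
  rw [pvTableEq a x hx1, pvTableEq b x hx1,
      pvTableEq a (PySem.Int.floordiv k x) hy1, pvTableEq b (PySem.Int.floordiv k x) hy1]
  simp only [hgA]
  by_cases hxy : x ≠ PySem.Int.floordiv k x
  · rw [if_pos hxy, if_pos (hiff.mp hxy)]
  · rw [if_neg hxy, if_neg (fun hc => hxy (hiff.mpr hc))]

-- ===== VERDICT (by name: the statement is the Claim_ definition above) =====
theorem count_subrectangles_fast_spec : Claim_equal_count_subrectangles_fast := by
  intro a b k _ hpre
  unfold Spec_count_subrectangles_fast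
  exact pvMain a b k hpre
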